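-- pv_equiv track=rewrite | github.com/ashwinidathatri/self_driving_materialized_views | project/selma.py | createVectorTable
-- ===== SOURCE A (Python) =====
-- def createVectorTable(tableI):
--     iValue  = 0
--     count = 0
--     size  = len(tableI)
--     iteratTable = tableI
--     vectable = {}
--     Vecmatrix  =  None
--
--     for iValue in range(size):
--         for key, value in tableI.items():
--             if(value == iValue):
--                 item = key
--                 jValue  = 0
--                 for key , value in tableI.items():
--                     if ((iValue != jValue) and (jValue < size)):
--                         newitem =  item + "-" + key
--                         itemreverse = key + "-" + item
--                         jValue = jValue + 1
--                         if((newitem in vectable.keys()) or (itemreverse in vectable.keys())):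
--                             None
--                         else:
--                             vectable.update({newitem : count})
--                             count  = count +1
--                     else:
--                         jValue = jValue +1
--         iValue = iValue +1
--     return(vectable)
-- ===== SOURCE B (Python) =====
-- def createVectorTable(tableI):
--     keys = list(tableI)
--     size = len(keys)
--     # A stable sort replaces A's rescan of the whole dict for every iValue:
--     # entries whose value is a valid rank, ascending by rank (dict order within a rank).
--     starters = sorted(((k, v) for k, v in tableI.items() if 0 <= v < size),
--                       key=lambda kv: kv[1])
--     # all candidate pairs, flattened into one staged list
--     cands = [(a, b) for a, v in starters for j, b in enumerate(keys) if j != v]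
--     # one dedup pass: keep a pair string unless it or its reverse was already kept
--     out = []
--     taken = set()
--     for a, b in cands:
--         s = a + "-" + b
--         if s not in taken and (b + "-" + a) not in taken:
--             taken.add(s)
--             out.append(s)
--     return {s: i for i, s in enumerate(out)}
-- ===== Notes on version B (the rewrite author's own statement) =====
-- stated objective: alternative
-- what changed: B replaces A's triple nested loop (a rescan of all dict items for every rank iValue, an inner rescan with a hand-maintained jValue counter, and membership tests against the growing result dict) by staged passes: a stable sort of the in-range entries by rank, one flattened candidate-pair list, a single dedup sweep over it with a separate seen-set, and a final enumeration into the result dict.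
import Mathlib
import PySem

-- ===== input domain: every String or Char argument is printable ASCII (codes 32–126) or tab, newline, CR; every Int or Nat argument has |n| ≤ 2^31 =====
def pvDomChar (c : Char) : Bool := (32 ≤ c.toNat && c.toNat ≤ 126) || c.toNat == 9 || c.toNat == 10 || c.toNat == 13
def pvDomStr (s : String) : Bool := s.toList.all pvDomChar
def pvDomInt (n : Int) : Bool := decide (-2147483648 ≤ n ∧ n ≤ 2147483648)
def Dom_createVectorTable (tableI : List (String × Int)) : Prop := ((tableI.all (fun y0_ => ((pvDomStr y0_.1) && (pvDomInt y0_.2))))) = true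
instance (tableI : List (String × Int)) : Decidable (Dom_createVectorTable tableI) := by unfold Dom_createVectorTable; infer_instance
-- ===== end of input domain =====

-- B replaces A's triple nested loop (rescan of all dict items for every rank, with a
-- hand-maintained jValue counter and membership tests against the growing result dict)
-- by staged passes: a stable sort of the in-range entries by rank, one flattened
-- candidate-pair list, a single dedup sweep with a seen-set, and a final enumeration.

-- ===== PORT A =====
-- the argument dict: the association list read as Python's dict(tableI) (overwrite keeps position)
def createVectorTable (tableI : List (String × Int)) : List (String × Int) :=
  let t := PySem.Dict.ofList tableI
  let size := PySem.List.len t.items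
  let res :=
    (PySem.List.pyRange 0 size 1).foldl (fun st iValue =>
      t.items.foldl (fun st kv =>
        if kv.2 == iValue then
          let item := kv.1
          (t.items.foldl (fun (p : (PySem.Dict String Int × Int) × Int) kv2 =>
            if iValue ≠ p.2 ∧ p.2 < size then
              let newitem := item ++ "-" ++ kv2.1
              let itemreverse := kv2.1 ++ "-" ++ item
              let jValue := p.2 + 1
              if p.1.1.contains newitem || p.1.1.contains itemreverse then
                (p.1, jValue)
              else
                ((p.1.1.insert newitem p.1.2, p.1.2 + 1), jValue)
            else
              (p.1, p.2 + 1)) (st, (0 : Int))).1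
        else st) st)
      ((PySem.Dict.empty : PySem.Dict String Int), (0 : Int))
  res.1.items

-- ===== PORT B =====
def createVectorTable_alt (tableI : List (String × Int)) : List (String × Int) :=
  let t := PySem.Dict.ofList tableI
  let keys := t.keys
  let size : Int := PySem.List.len keys
  let starters := PySem.List.sorted
    (t.items.filter (fun kv => decide (0 ≤ kv.2 ∧ kv.2 < size))) (fun kv => kv.2)
  let cands := starters.flatMap (fun av =>
    ((PySem.List.enumerate keys).filter (fun jb => decide (jb.1 ≠ av.2))).map
      (fun jb => (av.1, jb.2)))
  let res := cands.foldl (fun (st : List String × PySem.Set String) ab =>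
      let s := ab.1 ++ "-" ++ ab.2
      if !(PySem.Set.contains st.2 s) && !(PySem.Set.contains st.2 (ab.2 ++ "-" ++ ab.1)) then
        (st.1 ++ [s], PySem.Set.add st.2 s)
      else st) ([], PySem.Set.empty)
  ((PySem.List.enumerate res.1).foldl
    (fun (d : PySem.Dict String Int) p => d.insert p.2 p.1) PySem.Dict.empty).items

-- ===== PRECONDITION & SPEC =====
def Spec_createVectorTable (tableI : List (String × Int)) (out : List (String × Int)) : Prop := out = createVectorTable_alt tableI
instance (tableI : List (String × Int)) (out : List (String × Int)) : Decidable (Spec_createVectorTable tableI out) := by unfold Spec_createVectorTable; infer_instance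

-- ===== CLAIM (what is proved, stated in full; the proofs are below) =====
def Claim_equal_createVectorTable : Prop := ∀ (tableI : List (String × Int)), Dom_createVectorTable tableI → Spec_createVectorTable tableI (createVectorTable tableI)

-- ===== LEMMAS AND PROOFS =====

-- A's dedup step on its (dict, count) state
def pvDStep (st : PySem.Dict String Int × Int) (ab : String × String) : PySem.Dict String Int × Int :=
  if st.1.contains (ab.1 ++ "-" ++ ab.2) || st.1.contains (ab.2 ++ "-" ++ ab.1) then st
  else (st.1.insert (ab.1 ++ "-" ++ ab.2) st.2, st.2 + 1)

-- B's dedup step on its (list, seen-set) state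
def pvBStep (st : List String × PySem.Set String) (ab : String × String) : List String × PySem.Set String :=
  if !(PySem.Set.contains st.2 (ab.1 ++ "-" ++ ab.2)) && !(PySem.Set.contains st.2 (ab.2 ++ "-" ++ ab.1)) then
    (st.1 ++ [ab.1 ++ "-" ++ ab.2], PySem.Set.add st.2 (ab.1 ++ "-" ++ ab.2))
  else st

-- the dict {s_k : k} built from a list of distinct strings, as B builds it
def pvMkD (lst : List String) : PySem.Dict String Int :=
  (PySem.List.enumerate lst).foldl (fun d p => d.insert p.2 p.1) PySem.Dict.empty

theorem pvMkD_append (lst : List String) (s : String) :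
    pvMkD (lst ++ [s]) = (pvMkD lst).insert s (lst.length : Int) := by
  unfold pvMkD
  rw [PySem.List.enumerate_append, List.foldl_append]
  simp [PySem.List.enumerate]

theorem pvMkD_contains (lst : List String) (s : String) :
    (pvMkD lst).contains s = decide (s ∈ lst) := by
  have h := PySem.Dict.keys_foldl_insert_key (κ := String) (ν := Int)
      (l := PySem.List.enumerate lst) (key := fun p => p.2) (f := fun _ p => p.1)
      (d := PySem.Dict.empty)
  rw [PySem.Dict.contains_eq_decide_mem_keys]
  unfold pvMkD
  rw [h]
  simp [PySem.List.map_snd_enumerate, PySem.Dict.keys_empty]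

theorem pv_inner_eq (i size : Int) (item : String) :
    ∀ (l : List (String × Int)) (st : PySem.Dict String Int × Int) (j0 : Int),
      j0 + l.length ≤ size →
      (l.foldl (fun (p : (PySem.Dict String Int × Int) × Int) kv2 =>
          if i ≠ p.2 ∧ p.2 < size then
            if p.1.1.contains (item ++ "-" ++ kv2.1) || p.1.1.contains (kv2.1 ++ "-" ++ item) then
              (p.1, p.2 + 1)
            else ((p.1.1.insert (item ++ "-" ++ kv2.1) p.1.2, p.1.2 + 1), p.2 + 1)
          else (p.1, p.2 + 1)) (st, j0)).1
      = ((PySem.List.enumerate (l.map (fun p => p.1)) j0).filter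
          (fun jb => decide (jb.1 ≠ i))).foldl (fun st jb => pvDStep st (item, jb.2)) st := by
  intro l
  induction l with
  | nil => intro st j0 _; simp
  | cons kv rest ih =>
    intro st j0 h
    have hlt : j0 < size := by simp at h; omega
    have hrest : (j0 + 1) + rest.length ≤ size := by simp at h ⊢; omega
    rw [List.map_cons, PySem.List.enumerate_cons]
    simp only [List.foldl_cons, List.filter_cons]
    rcases eq_or_ne i j0 with hij | hij
    · subst hij
      rw [if_neg (fun hc => hc.1 rfl)]
      simp only [ne_eq, not_true_eq_false, decide_false]
      exact ih st (i + 1) hrest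
    · rw [if_pos ⟨hij, hlt⟩]
      simp only [ne_eq, hij.symm, not_false_eq_true, decide_true, if_true, List.foldl_cons]
      by_cases hc : (st.1.contains (item ++ "-" ++ kv.1) || st.1.contains (kv.1 ++ "-" ++ item)) = true
      · rw [if_pos hc, show pvDStep st (item, kv.1) = st by simp [pvDStep, hc]]
        exact ih st (j0 + 1) hrest
      · rw [if_neg hc, show pvDStep st (item, kv.1)
              = (st.1.insert (item ++ "-" ++ kv.1) st.2, st.2 + 1) by simp [pvDStep, hc]]
        exact ih _ (j0 + 1) hrest

theorem pv_insertBy_append (bef : (String × Int) → (String × Int) → Bool) (x : String × Int)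
    (p s : List (String × Int)) (h : ∀ y ∈ p, bef x y = false) :
    PySem.List.insertBy bef x (p ++ s) = p ++ PySem.List.insertBy bef x s := by
  induction p with
  | nil => simp
  | cons y p ih =>
    have hy : bef x y = false := h y (by simp)
    simp only [List.cons_append, PySem.List.insertBy, hy]
    simp [ih (fun z hz => h z (by simp [hz]))]

theorem pv_insertBy_cons (bef : (String × Int) → (String × Int) → Bool) (x : String × Int)
    (s : List (String × Int)) (h : ∀ y ∈ s, bef x y = true) :
    PySem.List.insertBy bef x s = x :: s := by
  cases s with
  | nil => simp [PySem.List.insertBy]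
  | cons y t => simp [PySem.List.insertBy, h y (by simp)]

theorem pv_sorted_groups (l : List (String × Int)) (a b : Int)
    (h : ∀ p ∈ l, a ≤ p.2 ∧ p.2 < b) :
    PySem.List.sorted l (fun p => p.2)
      = (PySem.List.pyRange a b 1).flatMap (fun i => l.filter (fun p => p.2 == i)) := by
  induction l using List.reverseRecOn with
  | nil => simp [PySem.List.sorted_eq_foldl_insertBy]
  | append_singleton l' x ih =>
    have hx := h x (by simp)
    have hl' : ∀ p ∈ l', a ≤ p.2 ∧ p.2 < b := fun p hp => h p (by simp [hp])
    rw [PySem.List.sorted_eq_foldl_insertBy, List.foldl_append, List.foldl_cons,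
        List.foldl_nil, ← PySem.List.sorted_eq_foldl_insertBy, ih hl']
    -- split the range at x.2
    rw [PySem.List.pyRange_one_append a x.2 b hx.1 (le_of_lt hx.2),
        PySem.List.pyRange_one_cons hx.2]
    simp only [List.flatMap_append, List.flatMap_cons]

    have hp : ∀ y ∈ (PySem.List.pyRange a x.2 1).flatMap
        (fun i => l'.filter (fun p => p.2 == i)),
        (fun p q : String × Int => decide (p.2 < q.2)) x y = false := by
      intro y hy
      simp only [List.mem_flatMap, PySem.List.mem_pyRange_one] at hy
      obtain ⟨i, hi, hyf⟩ := hy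
      have := List.of_mem_filter hyf
      simp only [beq_iff_eq] at this
      simp [this]
      omega
    have hfv : ∀ y ∈ l'.filter (fun p => p.2 == x.2),
        (fun p q : String × Int => decide (p.2 < q.2)) x y = false := by
      intro y hy
      have := List.of_mem_filter hy
      simp only [beq_iff_eq] at this
      simp [this]
    have hr : ∀ y ∈ (PySem.List.pyRange (x.2 + 1) b 1).flatMap
        (fun i => l'.filter (fun p => p.2 == i)),
        (fun p q : String × Int => decide (p.2 < q.2)) x y = true := by
      intro y hy
      simp only [List.mem_flatMap, PySem.List.mem_pyRange_one] at hy
      obtain ⟨i, hi, hyf⟩ := hy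
      have := List.of_mem_filter hyf
      simp only [beq_iff_eq] at this
      simp [this]
      omega
    have e1 := pv_insertBy_append (fun p q : String × Int => decide (p.2 < q.2)) x
      ((PySem.List.pyRange a x.2 1).flatMap (fun i => l'.filter (fun p => p.2 == i)))
      ((l'.filter (fun p => p.2 == x.2)) ++
        (PySem.List.pyRange (x.2 + 1) b 1).flatMap (fun i => l'.filter (fun p => p.2 == i))) hp
    rw [e1, pv_insertBy_append _ x (l'.filter (fun p => p.2 == x.2)) _ hfv,
       pv_insertBy_cons _ x _ hr]
    have hP : ∀ i ∈ PySem.List.pyRange a x.2 1,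
        (l' ++ [x]).filter (fun p => p.2 == i) = l'.filter (fun p => p.2 == i) := by
      intro i hi
      rw [PySem.List.mem_pyRange_one] at hi
      rw [List.filter_append]
      have : (x.2 == i) = false := by simp; omega
      simp [this]
    have hR : ∀ i ∈ PySem.List.pyRange (x.2 + 1) b 1,
        (l' ++ [x]).filter (fun p => p.2 == i) = l'.filter (fun p => p.2 == i) := by
      intro i hi
      rw [PySem.List.mem_pyRange_one] at hi
      rw [List.filter_append]
      have : (x.2 == i) = false := by simp; omega
      simp [this]
    have hF : (l' ++ [x]).filter (fun p => p.2 == x.2)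
        = l'.filter (fun p => p.2 == x.2) ++ [x] := by
      rw [List.filter_append]
      simp
    rw [List.flatMap_congr hP, List.flatMap_congr hR, hF]
    rw [List.append_cons]

theorem pv_dedup (L : List (String × String)) :
    ∀ (lst : List String), lst.Nodup →
      L.foldl pvDStep (pvMkD lst, (lst.length : Int))
        = (pvMkD (L.foldl pvBStep (lst, lst)).1,
           (((L.foldl pvBStep (lst, lst)).1.length : Int)))
      ∧ (L.foldl pvBStep (lst, lst)).1.Nodup
      ∧ (L.foldl pvBStep (lst, lst)).2 = (L.foldl pvBStep (lst, lst)).1 := by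
  induction L with
  | nil => intro lst h; exact ⟨rfl, h, rfl⟩
  | cons ab L ih =>
    intro lst h
    simp only [List.foldl_cons]
    by_cases hs : (ab.1 ++ "-" ++ ab.2) ∈ lst ∨ (ab.2 ++ "-" ++ ab.1) ∈ lst
    · have hd : pvDStep (pvMkD lst, (lst.length : Int)) ab = (pvMkD lst, (lst.length : Int)) := by
        unfold pvDStep
        rw [pvMkD_contains, pvMkD_contains]
        rcases hs with hs | hs <;> simp [hs]
      have hb : pvBStep (lst, lst) ab = (lst, lst) := by
        unfold pvBStep
        rcases hs with hs | hs <;> simp [hs]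
      rw [hd, hb]
      exact ih lst h
    · push Not at hs
      have hd : pvDStep (pvMkD lst, (lst.length : Int)) ab
          = (pvMkD (lst ++ [ab.1 ++ "-" ++ ab.2]), ((lst ++ [ab.1 ++ "-" ++ ab.2]).length : Int)) := by
        unfold pvDStep
        rw [pvMkD_contains, pvMkD_contains]
        simp only [hs.1, hs.2, decide_false, Bool.or_self]
        rw [pvMkD_append]
        simp
      have hb : pvBStep (lst, lst) ab
          = (lst ++ [ab.1 ++ "-" ++ ab.2], lst ++ [ab.1 ++ "-" ++ ab.2]) := by
        unfold pvBStep
        simp [hs.1, hs.2, PySem.Set.add_of_not_mem]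
      have hn : (lst ++ [ab.1 ++ "-" ++ ab.2]).Nodup := by
        simp only [List.nodup_append, List.nodup_cons]
        refine ⟨h, by simp, ?_⟩
        intro a ha b hb
        simp at hb
        subst hb
        exact fun he => hs.1 (he ▸ ha)
      rw [hd, hb]
      exact ih _ hn

-- the whole pipeline, stated over the item list of the dict
theorem pv_main (items : List (String × Int)) :
    ((PySem.List.pyRange 0 (items.length : Int) 1).foldl
      (fun st i =>
        items.foldl (fun st kv =>
          if kv.2 == i then
            (items.foldl (fun (p : (PySem.Dict String Int × Int) × Int) kv2 =>
              if i ≠ p.2 ∧ p.2 < (items.length : Int) then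
                if p.1.1.contains (kv.1 ++ "-" ++ kv2.1) || p.1.1.contains (kv2.1 ++ "-" ++ kv.1) then
                  (p.1, p.2 + 1)
                else ((p.1.1.insert (kv.1 ++ "-" ++ kv2.1) p.1.2, p.1.2 + 1), p.2 + 1)
              else (p.1, p.2 + 1)) (st, (0 : Int))).1
          else st) st)
      ((PySem.Dict.empty : PySem.Dict String Int), (0 : Int))).1.items
    = (pvMkD (((
        (PySem.List.sorted (items.filter (fun kv => decide (0 ≤ kv.2 ∧ kv.2 < (items.length : Int))))
          (fun kv => kv.2)).flatMap
          (fun av => ((PySem.List.enumerate (items.map (fun p => p.1))).filter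
            (fun jb => decide (jb.1 ≠ av.2))).map (fun jb => (av.1, jb.2)))).foldl
        pvBStep ([], PySem.Set.empty)).1)).items := by
  have hbody : ∀ (st : PySem.Dict String Int × Int) (i : Int),
      items.foldl (fun st kv =>
        if kv.2 == i then
          (items.foldl (fun (p : (PySem.Dict String Int × Int) × Int) kv2 =>
            if i ≠ p.2 ∧ p.2 < (items.length : Int) then
              if p.1.1.contains (kv.1 ++ "-" ++ kv2.1) || p.1.1.contains (kv2.1 ++ "-" ++ kv.1) then
                (p.1, p.2 + 1)
              else ((p.1.1.insert (kv.1 ++ "-" ++ kv2.1) p.1.2, p.1.2 + 1), p.2 + 1)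
            else (p.1, p.2 + 1)) (st, (0 : Int))).1
        else st) st
      = ((items.filter (fun kv => kv.2 == i)).flatMap
          (fun kv => ((PySem.List.enumerate (items.map (fun p => p.1))).filter
            (fun jb => decide (jb.1 ≠ i))).map (fun jb => (kv.1, jb.2)))).foldl pvDStep st := by
    intro st i
    rw [List.foldl_flatMap]
    rw [← PySem.List.foldl_if_eq_foldl_filter (p := fun kv : String × Int => kv.2 == i)]
    apply PySem.List.foldl_congr_mem
    intro acc kv _
    by_cases hv : (kv.2 == i) = true
    · rw [if_pos hv, if_pos hv, List.foldl_map,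
        pv_inner_eq i (items.length : Int) kv.1 items acc 0 (by simp)]
    · rw [if_neg hv, if_neg hv]
  rw [PySem.List.foldl_congr_mem (PySem.List.pyRange 0 (items.length : Int) 1) _
      (fun st i => ((items.filter (fun kv => kv.2 == i)).flatMap
          (fun kv => ((PySem.List.enumerate (items.map (fun p => p.1))).filter
            (fun jb => decide (jb.1 ≠ i))).map (fun jb => (kv.1, jb.2)))).foldl pvDStep st)
      ((PySem.Dict.empty : PySem.Dict String Int), (0 : Int))
      (fun st i _ => hbody st i), ← List.foldl_flatMap]
  -- the candidate lists agree
  have hfil : ∀ p ∈ items.filter (fun kv => decide (0 ≤ kv.2 ∧ kv.2 < (items.length : Int))),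
      (0 : Int) ≤ p.2 ∧ p.2 < (items.length : Int) := by
    intro p hp
    have := List.of_mem_filter hp
    simpa using this
  rw [pv_sorted_groups _ 0 (items.length : Int) hfil, List.flatMap_assoc]
  have hcand : ∀ i ∈ PySem.List.pyRange 0 (items.length : Int) 1,
      (items.filter (fun kv => kv.2 == i)).flatMap
        (fun kv => ((PySem.List.enumerate (items.map (fun p => p.1))).filter
          (fun jb => decide (jb.1 ≠ i))).map (fun jb => (kv.1, jb.2)))
      = ((items.filter (fun kv => decide (0 ≤ kv.2 ∧ kv.2 < (items.length : Int)))).filter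
          (fun kv => kv.2 == i)).flatMap
        (fun av => ((PySem.List.enumerate (items.map (fun p => p.1))).filter
          (fun jb => decide (jb.1 ≠ av.2))).map (fun jb => (av.1, jb.2))) := by
    intro i hi
    rw [PySem.List.mem_pyRange_one] at hi
    rw [List.filter_filter]
    have hff : ∀ kv : String × Int,
        ((kv.2 == i) && decide (0 ≤ kv.2 ∧ kv.2 < (items.length : Int))) = (kv.2 == i) := by
      intro kv
      by_cases hv : (kv.2 == i) = true
      · have : kv.2 = i := by simpa using hv
        simp [this, hi.1, hi.2]
      · simp [Bool.eq_false_iff.mpr hv]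
    rw [List.filter_congr (fun kv _ => hff kv)]
    apply List.flatMap_congr
    intro kv hkv
    have : kv.2 = i := by simpa using (List.of_mem_filter hkv)
    rw [this]
  rw [List.flatMap_congr hcand]
  -- run the dedup equivalence from the empty state
  have h0 : ((PySem.Dict.empty : PySem.Dict String Int), (0 : Int))
      = (pvMkD [], ((([] : List String).length : Int))) := by
    simp [pvMkD, PySem.List.enumerate]
  rw [h0]
  rw [(pv_dedup _ [] List.nodup_nil).1]
  rfl

theorem createVectorTable_spec' (tableI : List (String × Int)) :
    createVectorTable tableI = createVectorTable_alt tableI := by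
  unfold createVectorTable createVectorTable_alt
  simp only [PySem.List.len_eq, PySem.Dict.keys, List.length_map]
  exact pv_main (PySem.Dict.ofList tableI).items

-- ===== VERDICT (by name: the statement is the Claim_ definition above) =====
theorem createVectorTable_spec : Claim_equal_createVectorTable := by
  intro tableI _
  exact createVectorTable_spec' tableI
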